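-- pv_equiv track=rewrite | github.com/SpaceCatleta/Python_DiscordBot | processing/messages_proc.py | text_len
-- ===== SOURCE A (Python) =====
-- def text_len(stroke: str):
--     counter: int = 0
--     iscount: bool = True
--     for sym in stroke:
--         if sym == '<':
--             iscount = False
--         elif sym == '>':
--             iscount = True
--             continue
--         if iscount:
--             counter += 1
--     return counter
-- ===== SOURCE B (Python) =====
-- def text_len(stroke: str):
--     # skip-ahead: jump past each <...> tag using find instead of a per-char flag
--     total = 0
--     rest = stroke
--     while rest:
--         c = rest[0]
--         if c == '<':
--             j = rest.find('>')
--             if j == -1: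
--                 break
--             rest = rest[j + 1:]
--         elif c == '>':
--             rest = rest[1:]
--         else:
--             total += 1
--             rest = rest[1:]
--     return total
-- ===== Notes on version B (the rewrite author's own statement) =====
-- stated objective: alternative
-- what changed: Replaced the per-character boolean-flag state machine by a skip-ahead loop that, on '<', jumps past the whole tag at once with str.find('>') and otherwise counts/skips single characters; no counting flag is maintained.
import Mathlib
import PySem

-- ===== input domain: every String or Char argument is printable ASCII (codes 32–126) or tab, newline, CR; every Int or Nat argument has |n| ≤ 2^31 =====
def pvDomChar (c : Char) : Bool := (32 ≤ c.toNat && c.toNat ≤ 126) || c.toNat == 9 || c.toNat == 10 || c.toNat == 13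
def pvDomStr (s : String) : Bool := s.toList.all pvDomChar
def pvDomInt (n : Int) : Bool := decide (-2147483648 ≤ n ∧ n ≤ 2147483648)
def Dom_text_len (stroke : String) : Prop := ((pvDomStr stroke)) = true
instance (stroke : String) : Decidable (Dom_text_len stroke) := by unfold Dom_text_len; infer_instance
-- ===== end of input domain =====

-- B replaces A's per-character counting-flag machine by a skip-ahead loop that jumps past each '<...>' tag with find; same result, alternative structure.

-- ===== PORT A =====
-- loop body: if '<': iscount=False / elif '>': iscount=True; continue / if iscount: counter+=1
def pvStepA (st : Int × Bool) (sym : Char) : Int × Bool :=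
  if sym = '<' then
    let st := (st.1, false)
    if st.2 then (st.1 + 1, st.2) else st
  else if sym = '>' then (st.1, true)     -- continue: skip the counting step
  else if st.2 then (st.1 + 1, st.2) else st

def text_len (stroke : String) : Int :=
  (stroke.toList.foldl pvStepA (0, true)).1

-- ===== PORT B =====
-- while rest: '<' → jump past next '>' (break if none); '>' → skip it; else count it.
-- rest.find('>') is PySem.Chars.find; rest[j+1:] with j ≥ 0 is List.drop (j+1).toNat (exact there).
def text_len_altGo : List Char → Int → Int
  | [], total => total
  | c :: cs, total =>
    if c = '<' then
      let j := PySem.Chars.find (c :: cs) ['>']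
      if h : j = -1 then total
      else text_len_altGo ((c :: cs).drop (j + 1).toNat) total
    else if c = '>' then text_len_altGo cs total
    else text_len_altGo cs (total + 1)
termination_by rest _ => rest.length
decreasing_by
  · have h1 := PySem.Chars.neg_one_le_find (c :: cs) ['>']
    have h2 : ¬ PySem.Chars.find (c :: cs) ['>'] = -1 := h
    simp only [List.length_drop, List.length_cons]
    omega
  · simp
  · simp

def text_len_alt (stroke : String) : Int := text_len_altGo stroke.toList 0

-- ===== PRECONDITION & SPEC =====
def Spec_text_len (stroke : String) (out : Int) : Prop := out = text_len_alt stroke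
instance (stroke : String) (out : Int) : Decidable (Spec_text_len stroke out) := by unfold Spec_text_len; infer_instance

-- ===== CLAIM (what is proved, stated in full; the proofs are below) =====
def Claim_equal_text_len : Prop := ∀ (stroke : String), Dom_text_len stroke → Spec_text_len stroke (text_len stroke)

-- ===== LEMMAS AND PROOFS =====

-- reference semantics of A's flag machine
def pvRef : List Char → Bool → Int
  | [], _ => 0
  | c :: cs, b =>
    if c = '<' then pvRef cs false
    else if c = '>' then pvRef cs true
    else (if b then 1 else 0) + pvRef cs b

theorem pvFoldA (l : List Char) : ∀ (cnt : Int) (b : Bool),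
    (l.foldl pvStepA (cnt, b)).1 = cnt + pvRef l b := by
  induction l with
  | nil => intro cnt b; simp [pvRef]
  | cons c cs ih =>
    intro cnt b
    rw [List.foldl_cons]
    by_cases h1 : c = '<'
    · rw [show pvStepA (cnt, b) c = (cnt, false) by simp [pvStepA, h1]]
      simp [pvRef, h1, ih]
    · by_cases h2 : c = '>'
      · rw [show pvStepA (cnt, b) c = (cnt, true) by simp [pvStepA, h2]]
        simp [pvRef, h2, ih]
      · cases b
        · rw [show pvStepA (cnt, false) c = (cnt, false) by simp [pvStepA, h2]]
          simp [pvRef, h2, ih]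
        · rw [show pvStepA (cnt, true) c = (cnt + 1, true) by simp [pvStepA, h1, h2]]
          simp [pvRef, h1, h2, ih]
          ring

-- offset law for the fuel-free index counter inside PySem.Chars.find.go (sub = ['>'])
theorem pvGoOffset (l : List Char) :
    (∀ k : Nat, PySem.Chars.find.go ['>'] l k =
        if PySem.Chars.find.go ['>'] l 0 = -1 then -1 else PySem.Chars.find.go ['>'] l 0 + k) ∧
    (PySem.Chars.find.go ['>'] l 0 = -1 ∨ 0 ≤ PySem.Chars.find.go ['>'] l 0) := by
  induction l with
  | nil => constructor <;> simp [PySem.Chars.find.go]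
  | cons c cs ih =>
    by_cases h : c = '>'
    · constructor <;> simp [PySem.Chars.find.go, h, List.isPrefixOf]
    · have hpre : (['>'] : List Char).isPrefixOf (c :: cs) = false := by
        simp [List.isPrefixOf]; intro hc; exact h hc.symm
      obtain ⟨ihk, ihn⟩ := ih
      have step : ∀ k : Nat, PySem.Chars.find.go ['>'] (c :: cs) k = PySem.Chars.find.go ['>'] cs (k + 1) := by
        intro k; rw [PySem.Chars.find.go]; simp [hpre]
      rcases ihn with hneg | hpos
      · constructor
        · intro k; rw [step k, step 0, ihk (k + 1), ihk 1, hneg]; simp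
        · left; rw [step 0, ihk 1, hneg]; simp
      · constructor
        · intro k
          rw [step k, step 0, ihk (k + 1), ihk 1]
          have : PySem.Chars.find.go ['>'] cs 0 ≠ -1 := by omega
          simp [this]
          split_ifs with h2
          · omega
          · ring
        · right; rw [step 0, ihk 1]
          have : PySem.Chars.find.go ['>'] cs 0 ≠ -1 := by omega
          simp [this]; omega

-- one step of rest.find('>')
theorem pvFindStep (c : Char) (cs : List Char) :
    PySem.Chars.find (c :: cs) ['>'] =
      if c = '>' then 0
      else if PySem.Chars.find cs ['>'] = -1 then -1 else PySem.Chars.find cs ['>'] + 1 := by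
  by_cases h : c = '>'
  · simp [PySem.Chars.find, PySem.Chars.find.go, h, List.isPrefixOf]
  · have hpre : (['>'] : List Char).isPrefixOf (c :: cs) = false := by
      simp [List.isPrefixOf]; intro hc; exact h hc.symm
    have step : PySem.Chars.find.go ['>'] (c :: cs) 0 = PySem.Chars.find.go ['>'] cs 1 := by
      rw [PySem.Chars.find.go]; simp [hpre]
    simp only [PySem.Chars.find, h, if_false, step, (pvGoOffset cs).1 1]
    split_ifs <;> simp

-- A's machine with the flag off: nothing is counted until the next '>' (or the end)
theorem pvRefFalse (l : List Char) :
    pvRef l false =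
      if PySem.Chars.find l ['>'] = -1 then 0
      else pvRef (l.drop ((PySem.Chars.find l ['>']).toNat + 1)) true := by
  induction l with
  | nil => simp [pvRef, PySem.Chars.find, PySem.Chars.find.go]
  | cons c cs ih =>
    rw [pvFindStep]
    by_cases h : c = '>'
    · simp [pvRef, h]
    · have hlt : pvRef (c :: cs) false = pvRef cs false := by
        by_cases h1 : c = '<' <;> simp [pvRef, h1, h]
      have hn := PySem.Chars.neg_one_le_find cs ['>']
      by_cases h2 : PySem.Chars.find cs ['>'] = -1
      · simp [h, h2, hlt, ih]
      · have : PySem.Chars.find cs ['>'] + 1 ≠ -1 := by omega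
        simp only [h, if_false, h2, if_false, this, hlt, ih]
        have : (PySem.Chars.find cs ['>'] + 1).toNat + 1 = ((PySem.Chars.find cs ['>']).toNat + 1) + 1 := by omega
        rw [this]
        simp [List.drop_succ_cons]

-- B's loop computes A's machine with the flag on
theorem pvAltEq (l : List Char) (total : Int) : text_len_altGo l total = total + pvRef l true := by
  induction l, total using text_len_altGo.induct with
  | case1 total => simp [text_len_altGo, pvRef]
  | case2 cs total j hj =>
    have hn := PySem.Chars.neg_one_le_find cs ['>']
    have hj' : PySem.Chars.find ('<' :: cs) ['>'] = -1 := hj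
    have hstep := pvFindStep '<' cs
    rw [hj'] at hstep
    have hcs : PySem.Chars.find cs ['>'] = -1 := by
      by_cases h : PySem.Chars.find cs ['>'] = -1
      · exact h
      · simp [h] at hstep; omega
    have hz : pvRef cs false = 0 := by rw [pvRefFalse, if_pos hcs]
    rw [text_len_altGo, pvRef]
    simp [hj', hz]
  | case3 cs total j hj ih =>
    have hn := PySem.Chars.neg_one_le_find ('<' :: cs) ['>']
    have hj' : ¬ PySem.Chars.find ('<' :: cs) ['>'] = -1 := hj
    have ih' : text_len_altGo
        (List.drop ((PySem.Chars.find ('<' :: cs) ['>'] + 1)).toNat ('<' :: cs)) total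
        = total + pvRef
            (List.drop ((PySem.Chars.find ('<' :: cs) ['>'] + 1)).toNat ('<' :: cs)) true := ih
    rw [text_len_altGo, pvRef]
    simp only [reduceIte, hj', dif_neg, not_false_iff]
    rw [ih']
    congr 1
    have hcl : pvRef cs false = pvRef ('<' :: cs) false := by simp [pvRef]
    rw [hcl, pvRefFalse ('<' :: cs), if_neg hj']
    have htn : (PySem.Chars.find ('<' :: cs) ['>'] + 1).toNat
        = (PySem.Chars.find ('<' :: cs) ['>']).toNat + 1 := by omega
    rw [htn]
  | case4 cs total h ih =>
    rw [text_len_altGo, pvRef]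
    simp [ih]
  | case5 c cs total h h2 ih =>
    rw [text_len_altGo, pvRef]
    simp [h, h2, ih]
    ring

-- ===== VERDICT (by name: the statement is the Claim_ definition above) =====
theorem text_len_spec : Claim_equal_text_len := by
  intro stroke _
  unfold Spec_text_len text_len text_len_alt
  rw [pvFoldA, pvAltEq]
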